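-- pv_equiv track=rewrite | github.com/Meghanasveeramallu/SI-Primary | Powerful Subsets.py | f
-- ===== SOURCE A (Python) =====
-- def check(x):
--     return (x and (x & (x-1))==0)
--
-- def f(a, n):
--     if (n == 1):
--         if check(a[0]):
--             return "YES"
--     t = 0
--     for i in range(0, 32):
--         t = t | (1 << i)
--     for i in range(0, 32):
--         ans = t
--         for j in range(0, n):
--             if (a[j] & (1 << i)):
--                 ans = ans & a[j]
--         if (check(ans)):
--             return "YES"
--     return "NO"
-- ===== SOURCE B (Python) =====
-- def f(a, n):
--     # De Morgan dual of the AND-accumulation: in one pass over the elements,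
--     # OR each element's 32-bit complement into an accumulator for every set bit
--     # of the element; YES iff some accumulator equals MASK ^ (1 << i), i.e. the
--     # AND of the elements carrying bit i keeps bit i alone.
--     MASK = (1 << 32) - 1
--     ors = [0] * 32
--     for j in range(n):
--         x = a[j] & MASK
--         comp = x ^ MASK
--         i = 0
--         while x:
--             if x & 1:
--                 ors[i] |= comp
--             x >>= 1
--             i += 1
--     for i in range(32):
--         if ors[i] == MASK ^ (1 << i):
--             return "YES"
--     return "NO"
-- ===== Notes on version B (the rewrite author's own statement) =====
-- stated objective: alternative
-- what changed: Replaces A's 32 per-bit AND-scans of the array plus a power-of-two test by the De Morgan dual computed in one element pass: each element's 32-bit complement is OR-ed into a per-bit accumulator for every set bit of the element (walking only its set bits), and the answer is YES iff some accumulator equals MASK ^ (1 << i).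
import Mathlib
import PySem

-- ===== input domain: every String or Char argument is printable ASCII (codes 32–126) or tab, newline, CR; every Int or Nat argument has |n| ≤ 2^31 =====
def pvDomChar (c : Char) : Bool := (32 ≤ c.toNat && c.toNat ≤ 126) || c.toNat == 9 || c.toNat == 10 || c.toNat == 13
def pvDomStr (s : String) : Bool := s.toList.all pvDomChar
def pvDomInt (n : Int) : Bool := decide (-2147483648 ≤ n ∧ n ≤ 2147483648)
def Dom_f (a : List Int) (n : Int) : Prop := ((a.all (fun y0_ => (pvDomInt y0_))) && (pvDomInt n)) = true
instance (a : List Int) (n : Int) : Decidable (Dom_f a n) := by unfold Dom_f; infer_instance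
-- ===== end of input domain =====

-- B replaces A's 32 per-bit AND-scans + power-of-two test by its De Morgan dual: one pass over
-- the elements that ORs each element's 32-bit complement into per-bit accumulators (walking only
-- the element's set bits) and then compares each accumulator to the exact target MASK ^ (1 << i)
-- (objective: alternative algorithm, same asymptotic cost).

-- ===== PORT A =====
-- Python `check(x)`: truthy `x and (x & (x-1)) == 0`, used only in boolean position.
def pvCheck (x : Int) : Bool := x != 0 && (PySem.Int.band x (x - 1) == 0)

-- `a[j]` is ported as pyGetD with default 0; Pre_f guarantees every access is in range,
-- so the default is never taken on admitted inputs (Python raises IndexError outside Pre_f).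
def f (a : List Int) (n : Int) : String :=
  if n = 1 ∧ pvCheck (PySem.List.pyGetD a 0 0) then "YES"
  else
    let t : Int := (List.range 32).foldl (fun (t : Int) (i : ℕ) => PySem.Int.bor t ((1:Int) <<< i)) 0
    if (List.range 32).any (fun i =>
        pvCheck ((PySem.List.pyRange 0 n 1).foldl (fun (ans : Int) (j : Int) =>
          if PySem.Int.band (PySem.List.pyGetD a j 0) ((1:Int) <<< i) ≠ 0 then
            PySem.Int.band ans (PySem.List.pyGetD a j 0) else ans) t))
    then "YES" else "NO"

-- ===== PORT B =====
-- the `while x: … x >>= 1; i += 1` loop of Source B; `x &&& 1 = 1` is Python's truthy `x & 1`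
def pvBitLoop (comp : Nat) (x : Nat) (i : Nat) (ors : List Nat) : List Nat :=
  if x = 0 then ors
  else pvBitLoop comp (x >>> 1) (i + 1)
         (if x &&& 1 = 1 then ors.set i (ors.getD i 0 ||| comp) else ors)
termination_by x
decreasing_by simp only [Nat.shiftRight_one]; omega

-- `x = a[j] & MASK` is a nonnegative int (AND with the nonnegative mask), held as Nat (exact)
def f_alt (a : List Int) (n : Int) : String :=
  let ors : List Nat := List.replicate 32 0
  let ors := (PySem.List.pyRange 0 n 1).foldl (fun (ors : List Nat) (j : Int) =>
      let x : Nat := (PySem.Int.band (PySem.List.pyGetD a j 0) 4294967295).toNat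
      let comp : Nat := x ^^^ 4294967295
      pvBitLoop comp x 0 ors) ors
  if (List.range 32).any (fun i => ors.getD i 0 == 4294967295 ^^^ (1 <<< i)) then "YES" else "NO"

-- ===== PRECONDITION & SPEC =====
-- Pre_f: every index A reads is in range (A reads a[0] when n == 1 and a[j] for 0 <= j < n;
-- n <= len a covers both, trivially so for n <= 0). Outside it Python raises IndexError.
def Pre_f (a : List Int) (n : Int) : Prop := n ≤ (a.length : Int)
instance (a : List Int) (n : Int) : Decidable (Pre_f a n) := by unfold Pre_f; infer_instance
def pvWitness_f : List Int × Int := ([3, 5], 2)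
def Spec_f (a : List Int) (n : Int) (out : String) : Prop := out = f_alt a n
instance (a : List Int) (n : Int) (out : String) : Decidable (Spec_f a n out) := by unfold Spec_f; infer_instance

-- ===== CLAIM (what is proved, stated in full; the proofs are below) =====
def Claim_equal_f : Prop := ∀ (a : List Int) (n : Int), Dom_f a n → Pre_f a n → Spec_f a n (f a n)

-- ===== LEMMAS AND PROOFS =====

-- the step A performs on its running AND for bit i, and the step B performs on accumulator i
def pvStepA (a : List Int) (i : Nat) (ans : Int) (j : Int) : Int :=
  if PySem.Int.band (PySem.List.pyGetD a j 0) ((1:Int) <<< i) ≠ 0 then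
    PySem.Int.band ans (PySem.List.pyGetD a j 0) else ans

def pvXm (x : Int) : Nat := (PySem.Int.band x 4294967295).toNat

def pvStepB (a : List Int) (i : Nat) (o : Nat) (j : Int) : Nat :=
  if (pvXm (PySem.List.pyGetD a j 0)).testBit i then
    o ||| (pvXm (PySem.List.pyGetD a j 0) ^^^ 4294967295) else o

-- ---- basic bitwise facts ----

lemma pv_mask_cast : (4294967295 : Int) = ((4294967295 : Nat) : Int) := by norm_num

lemma pv_mask_testBit (i : Nat) : (4294967295 : Nat).testBit i = decide (i < 32) := by
  rw [show (4294967295 : Nat) = 2 ^ 32 - 1 from by norm_num, Nat.testBit_two_pow_sub_one]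

lemma pv_band_negSucc_coe (m v : Nat) :
    PySem.Int.band (Int.negSucc m) (v : Int) = ((v - (v &&& m) : Nat) : Int) := by
  simp only [PySem.Int.band, Int.negSucc_eq]
  norm_num
  intro h; exact absurd h (by omega)

lemma pv_band_coe_negSucc (n m : Nat) :
    PySem.Int.band (n : Int) (Int.negSucc m) = ((n - (n &&& m) : Nat) : Int) := by
  simp only [PySem.Int.band, Int.negSucc_eq]
  norm_num
  intro h; exact absurd h (by omega)

lemma pv_and_div_two (u v : Nat) : (u &&& v) / 2 = u / 2 &&& v / 2 := by
  apply Nat.eq_of_testBit_eq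
  intro i
  rw [Nat.testBit_div_two, Nat.testBit_and, Nat.testBit_and, Nat.testBit_div_two,
    Nat.testBit_div_two]

lemma pv_and_parity (u v : Nat) : (u &&& v) % 2 = 1 ↔ (u % 2 = 1 ∧ v % 2 = 1) := by
  have h := Nat.testBit_and u v 0
  simp only [Nat.testBit_zero] at h
  by_cases h1 : u % 2 = 1 <;> by_cases h2 : v % 2 = 1 <;> simp [h1, h2] at h ⊢ <;> omega

lemma pv_sub_and_testBit (k : Nat) : ∀ u v : Nat,
    (u - (u &&& v)).testBit k = (u.testBit k && !(v.testBit k)) := by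
  induction k with
  | zero =>
    intro u v
    have hA := pv_and_parity u v
    have hle : u &&& v ≤ u := Nat.and_le_left
    rw [Nat.testBit_zero, Nat.testBit_zero, Nat.testBit_zero, Bool.eq_iff_iff]
    simp only [Bool.and_eq_true, Bool.not_eq_true', decide_eq_true_eq, decide_eq_false_iff_not]
    omega
  | succ k ih =>
    intro u v
    have hA := pv_and_parity u v
    have hle : u &&& v ≤ u := Nat.and_le_left
    have hdiv : (u - (u &&& v)) / 2 = u / 2 - (u / 2 &&& v / 2) := by
      rw [← pv_and_div_two]
      omega
    rw [← Nat.testBit_div_two, hdiv, ih, Nat.testBit_div_two, Nat.testBit_div_two]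

lemma pv_testBit_high {n k : Nat} (hn : n < 2 ^ 32) (hk : ¬ k < 32) : n.testBit k = false :=
  Nat.testBit_lt_two_pow (lt_of_lt_of_le hn (Nat.pow_le_pow_right (by norm_num) (by omega)))

lemma pvXm_ofNat (m : Nat) : pvXm (m : Int) = m &&& 4294967295 := by
  rw [pvXm, pv_mask_cast, PySem.Int.band_natCast, Int.toNat_natCast]

lemma pvXm_negSucc (m : Nat) : pvXm (Int.negSucc m) = 4294967295 - (4294967295 &&& m) := by
  rw [pvXm, pv_mask_cast, pv_band_negSucc_coe, Int.toNat_natCast]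

lemma pvXm_lt (x : Int) : pvXm x < 2 ^ 32 := by
  cases x with
  | ofNat m => rw [Int.ofNat_eq_natCast, pvXm_ofNat]; have := Nat.and_le_right (n := m) (m := 4294967295); omega
  | negSucc m => rw [pvXm_negSucc]; omega

lemma pvXm_testBit (x : Int) (k : Nat) :
    (pvXm x).testBit k = (decide (k < 32) && (PySem.Int.band x ((2 ^ k : Nat) : Int) ≠ 0)) := by
  have hp : 0 < 2 ^ k := Nat.two_pow_pos k
  cases x with
  | ofNat m =>
    rw [Int.ofNat_eq_natCast, pvXm_ofNat, Nat.testBit_and, pv_mask_testBit,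
      PySem.Int.band_natCast, Nat.and_two_pow]
    cases hm : m.testBit k <;> simp [hm] <;> omega
  | negSucc m =>
    rw [pvXm_negSucc, pv_sub_and_testBit, pv_mask_testBit, pv_band_negSucc_coe,
      Nat.and_comm, Nat.and_two_pow]
    cases hm : m.testBit k <;> simp [hm] <;> omega

-- KEY: an AND against a value below 2^32 only sees the low 32 bits of the other operand
lemma pv_band_low (n : Nat) (hn : n < 2 ^ 32) (x : Int) :
    PySem.Int.band (n : Int) x = ((n &&& pvXm x : Nat) : Int) := by
  cases x with
  | ofNat m =>
    rw [Int.ofNat_eq_natCast, PySem.Int.band_natCast, pvXm_ofNat]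
    congr 1
    apply Nat.eq_of_testBit_eq
    intro k
    simp only [Nat.testBit_and, pv_mask_testBit]
    by_cases hk : k < 32
    · simp [hk]
    · simp [pv_testBit_high hn hk]
  | negSucc m =>
    rw [pv_band_coe_negSucc, pvXm_negSucc]
    congr 1
    apply Nat.eq_of_testBit_eq
    intro k
    rw [pv_sub_and_testBit, Nat.testBit_and, pv_sub_and_testBit, pv_mask_testBit]
    by_cases hk : k < 32
    · simp [hk]
    · simp [pv_testBit_high hn hk]

lemma pv_shift_cast (i : Nat) : ((1:Int) <<< i) = ((2 ^ i : Nat) : Int) := by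
  rw [Int.shiftLeft_eq]; push_cast; ring

-- GUARD: A's per-bit test agrees with B's testBit on the masked value
lemma pv_guard (x : Int) (i : Nat) (hi : i < 32) :
    (PySem.Int.band x ((1:Int) <<< i) ≠ 0) ↔ (pvXm x).testBit i = true := by
  rw [pv_shift_cast, pvXm_testBit]
  simp [hi]

-- the per-step De Morgan identity on 32-bit values
lemma pv_step_nat (o xm : Nat) (ho : o < 2 ^ 32) (hx : xm < 2 ^ 32) :
    (4294967295 ^^^ o) &&& xm = 4294967295 ^^^ (o ||| (xm ^^^ 4294967295)) := by
  apply Nat.eq_of_testBit_eq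
  intro k
  simp only [Nat.testBit_and, Nat.testBit_xor, Nat.testBit_or, pv_mask_testBit]
  by_cases hk : k < 32
  · simp only [hk, decide_true]
    cases o.testBit k <;> cases xm.testBit k <;> rfl
  · simp [pv_testBit_high ho hk, pv_testBit_high hx hk]

-- ---- powers of two ----

lemma pv_odd_and_pred {y : Nat} (hy : y % 2 = 1) : y &&& (y - 1) = y - 1 := by
  apply Nat.eq_of_testBit_eq
  intro k
  rw [Nat.testBit_and]
  cases k with
  | zero =>
    rw [Nat.testBit_zero, Nat.testBit_zero, decide_eq_false (by omega : ¬ (y - 1) % 2 = 1)]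
    simp
  | succ k =>
    simp only [← Nat.testBit_div_two]
    rw [show (y - 1) / 2 = y / 2 from by omega]
    cases h : (y / 2).testBit k <;> simp [h]

lemma pv_even_and_pred {y : Nat} (hy : y % 2 = 0) (h1 : 1 ≤ y) :
    y &&& (y - 1) = 2 * (y / 2 &&& (y / 2 - 1)) := by
  apply Nat.eq_of_testBit_eq
  intro k
  rw [Nat.testBit_and]
  cases k with
  | zero =>
    rw [Nat.testBit_zero, Nat.testBit_zero, Nat.testBit_zero,
      decide_eq_false (by omega : ¬ y % 2 = 1),
      decide_eq_false (by omega : ¬ (2 * (y / 2 &&& (y / 2 - 1))) % 2 = 1)]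
    simp
  | succ k =>
    simp only [← Nat.testBit_div_two]
    rw [show (y - 1) / 2 = y / 2 - 1 from by omega,
      show 2 * (y / 2 &&& (y / 2 - 1)) / 2 = y / 2 &&& (y / 2 - 1) from by omega,
      ← Nat.testBit_and]

lemma pv_pow2 (y : Nat) (h0 : y ≠ 0) (h : y &&& (y - 1) = 0) : ∃ k, y = 2 ^ k := by
  induction y using Nat.strong_induction_on with
  | _ y ih =>
    by_cases hpar : y % 2 = 1
    · have := pv_odd_and_pred hpar
      have hy1 : y = 1 := by omega
      exact ⟨0, by omega⟩
    · have hpar' : y % 2 = 0 := by omega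
      have h2 := pv_even_and_pred hpar' (by omega)
      have hhalf : y / 2 &&& (y / 2 - 1) = 0 := by omega
      obtain ⟨k, hk⟩ := ih (y / 2) (by omega) (by omega) hhalf
      exact ⟨k + 1, by rw [pow_succ]; omega⟩

lemma pv_two_pow_and_pred (k : Nat) : 2 ^ k &&& (2 ^ k - 1) = 0 := by
  apply Nat.eq_of_testBit_eq
  intro i
  rw [Nat.testBit_and, Nat.testBit_two_pow, Nat.testBit_two_pow_sub_one, Nat.zero_testBit]
  by_cases h : k = i
  · subst h; simp
  · simp [h]

lemma pv_check_nat (y : Nat) :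
    (pvCheck (y : Int) = true) ↔ (y ≠ 0 ∧ y &&& (y - 1) = 0) := by
  rcases Nat.eq_zero_or_pos y with h | h
  · subst h; simp [pvCheck]
  · rw [pvCheck, show ((y:Int) - 1) = ((y - 1 : Nat) : Int) from by omega, PySem.Int.band_natCast]
    simp only [Bool.and_eq_true, bne_iff_ne, beq_iff_eq]
    constructor
    · rintro ⟨h1, h2⟩; exact ⟨by exact_mod_cast h1, by exact_mod_cast h2⟩
    · rintro ⟨h1, h2⟩; exact ⟨by exact_mod_cast h1, by exact_mod_cast h2⟩

-- final per-accumulator characterisation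
lemma pv_char (i : Nat) (hi : i < 32) (o : Nat) (_ho : o < 2 ^ 32) (hb : o.testBit i = false) :
    (pvCheck ((4294967295 ^^^ o : Nat) : Int) = true) ↔ o = 4294967295 ^^^ 2 ^ i := by
  rw [pv_check_nat]
  constructor
  · rintro ⟨h0, h1⟩
    obtain ⟨k, hk⟩ := pv_pow2 _ h0 h1
    have hbit : ((4294967295 : Nat) ^^^ o).testBit i = true := by
      rw [Nat.testBit_xor, pv_mask_testBit, hb]; simp [hi]
    rw [hk, Nat.testBit_two_pow] at hbit
    have hki : k = i := of_decide_eq_true hbit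
    have : (4294967295 : Nat) ^^^ (4294967295 ^^^ o) = 4294967295 ^^^ 2 ^ i := by
      rw [hk, hki]
    simpa [Nat.xor_xor_cancel_left] using this
  · intro h
    rw [h, ← Nat.xor_assoc, Nat.xor_self, Nat.zero_xor]
    exact ⟨by positivity, pv_two_pow_and_pred i⟩

-- ---- the A-fold / B-fold invariant ----

lemma pv_inv (a : List Int) (i : Nat) (hi : i < 32) (js : List Int) : ∀ o : Nat,
    o < 2 ^ 32 → o.testBit i = false →
    js.foldl (pvStepA a i) ((4294967295 ^^^ o : Nat) : Int)
      = ((4294967295 ^^^ js.foldl (pvStepB a i) o : Nat) : Int)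
    ∧ js.foldl (pvStepB a i) o < 2 ^ 32
    ∧ (js.foldl (pvStepB a i) o).testBit i = false := by
  induction js with
  | nil => intro o ho hb; exact ⟨rfl, ho, hb⟩
  | cons j js ih =>
    intro o ho hb
    simp only [List.foldl_cons]
    by_cases hg : (pvXm (PySem.List.pyGetD a j 0)).testBit i
    · have hA : pvStepA a i ((4294967295 ^^^ o : Nat) : Int) j
          = ((4294967295 ^^^ (o ||| (pvXm (PySem.List.pyGetD a j 0) ^^^ 4294967295)) : Nat) : Int) := by
        rw [pvStepA, if_pos ((pv_guard _ i hi).mpr hg),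
          pv_band_low _ (Nat.xor_lt_two_pow (by norm_num) ho) _,
          pv_step_nat o _ ho (pvXm_lt _)]
      have hB : pvStepB a i o j = o ||| (pvXm (PySem.List.pyGetD a j 0) ^^^ 4294967295) := by
        rw [pvStepB, if_pos hg]
      rw [hA, hB]
      apply ih
      · exact Nat.or_lt_two_pow ho (Nat.xor_lt_two_pow (pvXm_lt _) (by norm_num))
      · rw [Nat.testBit_or, Nat.testBit_xor, hb, pv_mask_testBit, hg]
        simp [hi]
    · have hA : pvStepA a i ((4294967295 ^^^ o : Nat) : Int) j = ((4294967295 ^^^ o : Nat) : Int) := by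
        rw [pvStepA, if_neg (fun hcon => hg ((pv_guard _ i hi).mp hcon))]
      have hB : pvStepB a i o j = o := by rw [pvStepB, if_neg hg]
      rw [hA, hB]
      exact ih o ho hb

-- ---- characterising B's accumulator list ----

lemma pv_set_map_range {α : Type} {M m : ℕ} (_hm : m < M) (g : ℕ → α) (v : α) :
    ((List.range M).map g).set m v = (List.range M).map (fun i => if i = m then v else g i) := by
  apply List.ext_getElem
  · simp
  · intro i h1 h2
    simp only [List.getElem_set, List.getElem_map, List.getElem_range]
    by_cases h : m = i
    · simp [h]
    · rw [if_neg h, if_neg (fun hh => h hh.symm)]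

lemma pv_bitLoop_eq (comp : Nat) : ∀ x i (g : Nat → Nat), x < 2 ^ (32 - i) →
    pvBitLoop comp x i ((List.range 32).map g)
      = (List.range 32).map (fun k => if i ≤ k ∧ x.testBit (k - i) then g k ||| comp else g k) := by
  intro x
  induction x using Nat.strong_induction_on with
  | _ x ihx =>
    intro i g hx
    rw [pvBitLoop]
    by_cases hx0 : x = 0
    · subst hx0
      rw [if_pos rfl]
      apply List.map_congr_left
      intro k _
      simp [Nat.zero_testBit]
    · rw [if_neg hx0]
      have hi32 : i < 32 := by
        by_contra hcon
        have : 32 - i = 0 := by omega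
        rw [this] at hx
        omega
      have hx2 : x / 2 < 2 ^ (32 - (i + 1)) := by
        have : 2 ^ (32 - i) = 2 * 2 ^ (32 - (i + 1)) := by
          rw [← pow_succ']
          congr 1
          omega
        omega
      have hgd : ((List.range 32).map g).getD i 0 = g i := by
        rw [List.getD_eq_getElem _ _ (by simpa using hi32)]
        simp
      have step : (if x &&& 1 = 1 then ((List.range 32).map g).set i (((List.range 32).map g).getD i 0 ||| comp)
            else (List.range 32).map g)
          = (List.range 32).map (fun k => if k = i ∧ x.testBit 0 then g k ||| comp else g k) := by
        rw [hgd, Nat.and_one_is_mod]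
        by_cases hpar : x % 2 = 1
        · rw [if_pos hpar, pv_set_map_range hi32]
          apply List.map_congr_left
          intro k _
          by_cases hki : k = i
          · subst hki; simp [Nat.testBit_zero, hpar]
          · simp [hki]
        · rw [if_neg hpar]
          apply List.map_congr_left
          intro k _
          simp [Nat.testBit_zero, hpar]
      rw [step, ihx (x >>> 1) (by rw [Nat.shiftRight_one]; omega) (i + 1) _ (by rw [Nat.shiftRight_one]; exact hx2)]
      apply List.map_congr_left
      intro k _
      rcases lt_trichotomy k i with hk | hk | hk
      · rw [if_neg (by omega), if_neg (by rintro ⟨h1, _⟩; omega), if_neg (by rintro ⟨h1, _⟩; omega)]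
      · subst hk
        rw [if_neg (by rintro ⟨h1, _⟩; omega)]
        by_cases hb : x.testBit 0
        · rw [if_pos ⟨rfl, hb⟩, if_pos ⟨le_refl k, by rw [Nat.sub_self]; exact hb⟩]
        · rw [if_neg (by rintro ⟨_, h2⟩; exact hb h2),
            if_neg (by rintro ⟨_, h2⟩; rw [Nat.sub_self] at h2; exact hb h2)]
      · have hne : ¬ (k = i ∧ x.testBit 0) := by rintro ⟨h1, _⟩; omega
        rw [if_neg hne]
        have hbit : (x >>> 1).testBit (k - (i + 1)) = x.testBit (k - i) := by
          rw [Nat.shiftRight_one, Nat.testBit_div_two]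
          congr 1
          omega
        by_cases hb : x.testBit (k - i)
        · rw [if_pos ⟨by omega, by rw [hbit]; exact hb⟩, if_pos ⟨by omega, hb⟩]
        · rw [if_neg (by rintro ⟨_, h2⟩; rw [hbit] at h2; exact hb h2), if_neg (by rintro ⟨_, h2⟩; exact hb h2)]

lemma pv_outer (a : List Int) (js : List Int) : ∀ g : Nat → Nat,
    js.foldl (fun (ors : List Nat) (j : Int) =>
        pvBitLoop ((PySem.Int.band (PySem.List.pyGetD a j 0) 4294967295).toNat ^^^ 4294967295)
          (PySem.Int.band (PySem.List.pyGetD a j 0) 4294967295).toNat 0 ors)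
      ((List.range 32).map g)
    = (List.range 32).map (fun i => js.foldl (pvStepB a i) (g i)) := by
  induction js with
  | nil => intro g; rfl
  | cons j js ih =>
    intro g
    simp only [List.foldl_cons]
    rw [pv_bitLoop_eq _ _ 0 g (by simpa [pvXm] using pvXm_lt (PySem.List.pyGetD a j 0)), ih]
    apply List.map_congr_left
    intro i _
    congr 1
    simp only [Nat.zero_le, true_and, Nat.sub_zero]
    rfl

lemma pv_any_congr {α : Type} (l : List α) (p q : α → Bool) (h : ∀ x ∈ l, p x = q x) :
    l.any p = l.any q := by
  induction l with
  | nil => rfl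
  | cons x l ih =>
    simp only [List.any_cons, h x (List.mem_cons_self), ih (fun y hy => h y (List.mem_cons_of_mem x hy))]

lemma pv_b_eq (a : List Int) (n : Int) :
    f_alt a n = if (List.range 32).any (fun i =>
        (PySem.List.pyRange 0 n 1).foldl (pvStepB a i) 0 == 4294967295 ^^^ (1 <<< i))
      then "YES" else "NO" := by
  rw [f_alt]
  rw [show (List.replicate 32 (0:Nat)) = (List.range 32).map (fun _ => 0) from by
    rw [List.map_const', List.length_range]]
  rw [pv_outer]
  -- the 32 getD's of the mapped range-32 list reduce to the mapped function values
  congr 1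

-- Bool-level transfer of pv_char + pv_inv to the two any-conditions
lemma pv_any_eq (a : List Int) (js : List Int) :
    (List.range 32).any (fun i => pvCheck (js.foldl (pvStepA a i) 4294967295))
      = (List.range 32).any (fun i => js.foldl (pvStepB a i) 0 == 4294967295 ^^^ (1 <<< i)) := by
  apply pv_any_congr
  intro i hi
  have hi32 : i < 32 := List.mem_range.mp hi
  obtain ⟨h1, h2, h3⟩ := pv_inv a i hi32 js 0 (by norm_num) (Nat.zero_testBit i)
  rw [show (4294967295 : Int) = ((4294967295 ^^^ 0 : Nat) : Int) from by norm_num, h1]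
  rw [Nat.one_shiftLeft]
  rw [Bool.eq_iff_iff, beq_iff_eq]
  simpa using pv_char i hi32 _ h2 (by simpa using h3)

-- ---- the n == 1 shortcut branch ----

lemma pv_check_pos {x : Int} (h : pvCheck x = true) : 0 < x := by
  cases x with
  | ofNat m =>
    have hm : m ≠ 0 := by
      intro h0; subst h0; simp [pvCheck] at h
    have : (0:Int) < (m:Int) := by exact_mod_cast Nat.pos_of_ne_zero hm
    simpa using this
  | negSucc m =>
    exfalso
    have hlt : (Int.negSucc m) - 1 = Int.negSucc (m + 1) := by
      simp [Int.negSucc_eq]; ring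
    simp [pvCheck, hlt, PySem.Int.band] at h
    omega

lemma pv_band_full {x : Int} (h0 : 0 < x) (h1 : x ≤ 2147483648) :
    PySem.Int.band 4294967295 x = x := by
  lift x to ℕ using h0.le with m
  have hm : m < 2 ^ 32 := by
    have h2 : (m : Int) < 4294967296 := by omega
    have h3 : m < 4294967296 := by exact_mod_cast h2
    calc m < 4294967296 := h3
      _ = 2 ^ 32 := by norm_num
  rw [pv_mask_cast, PySem.Int.band_natCast]
  congr 1
  apply Nat.eq_of_testBit_eq
  intro j
  rw [Nat.testBit_and, pv_mask_testBit]
  by_cases hj : j < 32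
  · simp [hj]
  · simp [pv_testBit_high hm hj]

lemma pv_exists_bit {x : Int} (h0 : 0 < x) (h1 : x ≤ 2147483648) :
    ∃ k : ℕ, k < 32 ∧ PySem.Int.band x ((1:Int) <<< k) ≠ 0 := by
  lift x to ℕ using h0.le with m
  have hm0 : m ≠ 0 := by exact_mod_cast h0.ne'
  obtain ⟨k, hk, hmax⟩ := Nat.exists_most_significant_bit hm0
  have hge : 2 ^ k ≤ m := by
    by_contra hlt
    rw [Nat.testBit_lt_two_pow (by omega)] at hk
    exact Bool.false_ne_true hk
  have hm31 : m ≤ 2 ^ 31 := by exact_mod_cast h1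
  have hk31 : k ≤ 31 := by
    by_contra hgt
    have : 2 ^ 32 ≤ 2 ^ k := Nat.pow_le_pow_right (by norm_num) (by omega)
    omega
  refine ⟨k, by omega, ?_⟩
  rw [pv_shift_cast, PySem.Int.band_natCast, Nat.and_two_pow, hk]
  simp

set_option maxRecDepth 100000 in
lemma pv_t : (List.range 32).foldl (fun (t : Int) (i : ℕ) => PySem.Int.bor t ((1:Int) <<< i)) 0
    = (4294967295 : Int) := by decide

lemma pv_main (a : List Int) (n : Int) (hDom : Dom_f a n) (hPre : Pre_f a n) :
    f a n = f_alt a n := by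
  have hPre' : n ≤ (a.length : Int) := hPre
  rw [pv_b_eq]
  by_cases hc : n = 1 ∧ pvCheck (PySem.List.pyGetD a 0 0) = true
  · obtain ⟨hn1, hchk⟩ := hc
    subst hn1
    rw [f, if_pos ⟨rfl, hchk⟩]
    have hlen : 0 < a.length := by
      by_contra hl
      simp at hl
      rw [hl] at hPre'
      norm_num at hPre'
    have hx0 : PySem.List.pyGetD a 0 0 = a[0] := by
      rw [PySem.List.pyGetD_zero, List.getD_eq_getElem a 0 hlen]
    have hmem : a[0] ∈ a := List.getElem_mem hlen
    have hbnd : -2147483648 ≤ a[0] ∧ a[0] ≤ 2147483648 := by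
      simp [Dom_f, pvDomInt, List.all_eq_true] at hDom
      exact hDom _ hmem
    have hpos : 0 < PySem.List.pyGetD a 0 0 := pv_check_pos hchk
    obtain ⟨k, hk32, hband⟩ := pv_exists_bit (x := PySem.List.pyGetD a 0 0) hpos
      (by rw [hx0]; exact hbnd.2)
    have hr1 : PySem.List.pyRange 0 1 1 = [0] := by
      rw [PySem.List.pyRange_one]; norm_num
    have hany : (List.range 32).any (fun i =>
        pvCheck ((PySem.List.pyRange 0 1 1).foldl (pvStepA a i) 4294967295)) = true := by
      rw [hr1, List.any_eq_true]
      refine ⟨k, List.mem_range.mpr hk32, ?_⟩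
      simp only [List.foldl_cons, List.foldl_nil, pvStepA, if_pos hband]
      rw [pv_band_full hpos (by rw [hx0]; exact hbnd.2)]
      exact hchk
    rw [← pv_any_eq, hany, if_pos rfl]
  · rw [f, if_neg hc]
    simp only [pv_t]
    rw [show (fun (i : ℕ) => pvCheck ((PySem.List.pyRange 0 n 1).foldl (fun (ans : Int) (j : Int) =>
          if PySem.Int.band (PySem.List.pyGetD a j 0) ((1:Int) <<< i) ≠ 0 then
            PySem.Int.band ans (PySem.List.pyGetD a j 0) else ans) 4294967295))
        = (fun (i : ℕ) => pvCheck ((PySem.List.pyRange 0 n 1).foldl (pvStepA a i) 4294967295)) from rfl]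
    rw [pv_any_eq]

-- ===== VERDICT (by name: the statement is the Claim_ definition above) =====
theorem f_spec : Claim_equal_f := by
  intro a n hDom hPre
  exact (pv_main a n hDom hPre)
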